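-- pv_equiv track=rewrite | github.com/tthhiinnaa/PS_programmers | 프로그래머스/1/133502. 햄버거 만들기/햄버거 만들기.py | solution
-- ===== SOURCE A (Python) =====
-- def solution(ingredient):
--     answer = 0
--     stack = []
--     for i in ingredient:
--         stack.append(i)
--         if stack[-4:] == [1,2,3,1]:
--             answer+= 1
--             stack.pop()
--             stack.pop()
--             stack.pop()
--             stack.pop()
--
--
--     return answer
-- ===== SOURCE B (Python) =====
-- def _find(lst):
--     """Return the first index i with lst[i:i+4] == [1,2,3,1], or None."""
--     for i in range(len(lst) - 3):
--         if lst[i:i+4] == [1, 2, 3, 1]: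
--             return i
--     return None
--
--
-- def solution(ingredient):
--     # Repeated-removal search: splice out the first [1,2,3,1] window,
--     # count it, and rescan from the beginning until none remains.
--     lst = list(ingredient)
--     answer = 0
--     while True:
--         i = _find(lst)
--         if i is None:
--             return answer
--         del lst[i:i+4]
--         answer += 1
-- ===== Notes on version B (the rewrite author's own statement) =====
-- stated objective: alternative
-- what changed: Replaces the one-pass push/pop stack scan with a repeated-removal search that splices out the first [1,2,3,1] window of a working copy and rescans from the start until no window remains.
import Mathlib
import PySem

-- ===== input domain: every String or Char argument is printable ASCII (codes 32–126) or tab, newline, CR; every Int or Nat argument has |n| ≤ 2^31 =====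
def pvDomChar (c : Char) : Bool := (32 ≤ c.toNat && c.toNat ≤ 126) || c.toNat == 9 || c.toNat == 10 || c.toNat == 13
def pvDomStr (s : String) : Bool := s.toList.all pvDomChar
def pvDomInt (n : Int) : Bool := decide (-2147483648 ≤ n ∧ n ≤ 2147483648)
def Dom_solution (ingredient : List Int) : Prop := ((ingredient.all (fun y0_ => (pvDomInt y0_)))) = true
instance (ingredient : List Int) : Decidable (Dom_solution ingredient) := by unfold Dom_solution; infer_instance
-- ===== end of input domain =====

-- B replaces A's one-pass push/pop stack scan by a repeated-removal search:
-- splice out the first [1,2,3,1] window and rescan from the start (alternative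
-- decomposition, same results; not claimed faster).

-- ===== PORT A =====
-- one loop step of A: append, then `stack[-4:] == [1,2,3,1]` check and four pops.
-- `stack[-4:]` is ported as `s.drop (s.length - 4)`: exact, since for length < 4
-- Nat subtraction gives 0 and Python's s[-4:] likewise yields the whole list;
-- each `pop()` is `dropLast`.
def stepA (st : Int × List Int) (x : Int) : Int × List Int :=
  let s := st.2 ++ [x]
  if s.drop (s.length - 4) = ([1, 2, 3, 1] : List Int) then
    (st.1 + 1, s.dropLast.dropLast.dropLast.dropLast)
  else
    (st.1, s)

def solution (ingredient : List Int) : Int :=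
  (ingredient.foldl stepA (0, [])).1

-- ===== PORT B =====
-- port of Source B's `_find`: scans windows left to right (same order as the
-- Python index loop comparing lst[i:i+4]), first match wins.
def findPat : List Int → Option Nat
  | a :: b :: c :: d :: t =>
      if [a, b, c, d] = ([1, 2, 3, 1] : List Int) then some 0
      else (findPat (b :: c :: d :: t)).map (· + 1)
  | _ => none

theorem findPat_some_le (l : List Int) : ∀ i, findPat l = some i → i + 4 ≤ l.length := by
  induction l using findPat.induct with
  | case1 a b c d t h4 =>
      intro i h; rw [findPat, if_pos h4] at h; cases h; simp
  | case2 a b c d t h4 ih =>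
      intro i h
      rw [findPat, if_neg h4] at h
      simp only [Option.map_eq_some_iff] at h
      obtain ⟨j, hj, rfl⟩ := h
      have := ih j hj
      simp at this ⊢; omega
  | case3 l hl =>
      intro i h
      rw [findPat.eq_def] at h
      split at h
      · exact absurd rfl (hl _ _ _ _ _)
      · simp at h

-- port of Source B's main `while True` loop: del lst[i:i+4] is take/drop splicing.
def loopB (answer : Int) (l : List Int) : Int :=
  match h : findPat l with
  | none => answer
  | some i => loopB (answer + 1) (l.take i ++ l.drop (i + 4))
termination_by l.length
decreasing_by
  have := findPat_some_le l i h
  simp; omega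

def solution_alt (ingredient : List Int) : Int := loopB 0 ingredient

-- ===== PRECONDITION & SPEC =====
def Spec_solution (ingredient : List Int) (out : Int) : Prop := out = solution_alt ingredient
instance (ingredient : List Int) (out : Int) : Decidable (Spec_solution ingredient out) := by unfold Spec_solution; infer_instance

-- ===== CLAIM (what is proved, stated in full; the proofs are below) =====
def Claim_equal_solution : Prop := ∀ (ingredient : List Int), Dom_solution ingredient → Spec_solution ingredient (solution ingredient)

-- ===== LEMMAS AND PROOFS =====

-- characterisation of findPat
theorem short_no_window (l : List Int) (hl : l.length < 4) :
    ∀ i, ((l.drop i).take 4) ≠ ([1, 2, 3, 1] : List Int) := by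
  intro i hc
  have : ((l.drop i).take 4).length < 4 := by
    simp; omega
  rw [hc] at this; simp at this

theorem findPat_none_window (l : List Int) : findPat l = none →
    ∀ i, ((l.drop i).take 4) ≠ ([1, 2, 3, 1] : List Int) := by
  induction l using findPat.induct with
  | case1 a b c d t h4 =>
      intro h; rw [findPat, if_pos h4] at h; simp at h
  | case2 a b c d t h4 ih =>
      intro h i
      rw [findPat, if_neg h4] at h
      simp only [Option.map_eq_none_iff] at h
      cases i with
      | zero => simpa using h4
      | succ j => simpa [List.drop_succ_cons] using ih h j
  | case3 l hl =>
      intro _ i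
      apply short_no_window
      rcases l with _ | ⟨a, _ | ⟨b, _ | ⟨c, _ | ⟨d, t⟩⟩⟩⟩ <;> simp_all
      exact (hl a b c d t rfl rfl rfl rfl rfl).elim

theorem findPat_some_window (l : List Int) : ∀ i, findPat l = some i →
    ((l.drop i).take 4) = ([1, 2, 3, 1] : List Int) ∧
    ∀ j, j < i → ((l.drop j).take 4) ≠ ([1, 2, 3, 1] : List Int) := by
  induction l using findPat.induct with
  | case1 a b c d t h4 =>
      intro i h; rw [findPat, if_pos h4] at h; cases h
      exact ⟨by simpa using h4, by omega⟩
  | case2 a b c d t h4 ih =>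
      intro i h
      rw [findPat, if_neg h4] at h
      simp only [Option.map_eq_some_iff] at h
      obtain ⟨j, hj, rfl⟩ := h
      obtain ⟨hw, hmin⟩ := ih j hj
      refine ⟨by simpa [List.drop_succ_cons] using hw, ?_⟩
      intro k hk
      cases k with
      | zero => simpa using h4
      | succ k' => simpa [List.drop_succ_cons] using hmin k' (by omega)
  | case3 l hl =>
      intro i h
      rw [findPat.eq_def] at h
      split at h
      · exact absurd rfl (hl _ _ _ _ _)
      · simp at h

-- answer-shift lemmas
theorem foldA_shift (l : List Int) (s : List Int) (a : Int) :
    l.foldl stepA (a, s) =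
      (a + (l.foldl stepA (0, s)).1, (l.foldl stepA (0, s)).2) := by
  induction l generalizing a s with
  | nil => simp
  | cons x t ih =>
      simp only [List.foldl_cons, stepA]
      split
      · rw [ih _ (a + 1), ih _ (0 + 1)]
        simp
        ring
      · rw [ih, ih _ (0 : Int)]

theorem loopB_none (a : Int) (l : List Int) (h : findPat l = none) : loopB a l = a := by
  rw [loopB.eq_def]
  split
  · rfl
  · rename_i i heq; rw [h] at heq; cases heq

theorem loopB_some (a : Int) (l : List Int) (i : Nat) (h : findPat l = some i) :
    loopB a l = loopB (a + 1) (l.take i ++ l.drop (i + 4)) := by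
  rw [loopB.eq_def]
  split
  · rename_i heq; rw [h] at heq; cases heq
  · rename_i i' heq
    rw [h] at heq; injection heq with hi; subst hi; rfl

theorem loopB_shift_aux (n : Nat) : ∀ l : List Int, l.length ≤ n →
    ∀ a : Int, loopB a l = a + loopB 0 l := by
  induction n with
  | zero =>
      intro l hl a
      have hnil : l = [] := by cases l <;> simp_all
      subst hnil
      rw [loopB_none a [] rfl, loopB_none 0 [] rfl]
      ring
  | succ n ih =>
      intro l hl a
      cases hf : findPat l with
      | none => rw [loopB_none a l hf, loopB_none 0 l hf]; ring
      | some i =>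
          have hlen := findPat_some_le l i hf
          have hrec : (l.take i ++ l.drop (i + 4)).length ≤ n := by simp; omega
          rw [loopB_some a l i hf, loopB_some 0 l i hf,
            ih _ hrec (a + 1), ih _ hrec (0 + 1)]
          ring

theorem loopB_shift (l : List Int) (a : Int) : loopB a l = a + loopB 0 l :=
  loopB_shift_aux l.length l le_rfl a

-- a run of A over l starting with stack p makes no removal when p++l has no window
theorem fold_no_removal (l : List Int) (p : List Int) (a : Int)
    (h : ∀ i, (((p ++ l).drop i).take 4) ≠ ([1, 2, 3, 1] : List Int)) :
    l.foldl stepA (a, p) = (a, p ++ l) := by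
  induction l generalizing p with
  | nil => simp
  | cons x t ih =>
      simp only [List.foldl_cons, stepA]
      rw [if_neg]
      · have := ih (p ++ [x]) (by intro i; simpa [List.append_assoc] using h i)
        simpa [List.append_assoc] using this
      · set s := p ++ [x] with hs
        intro hc
        have hL : s.length = p.length + 1 := by rw [hs]; simp
        by_cases hlen : s.length < 4
        · have : (s.drop (s.length - 4)).length < 4 := by simp; omega
          rw [hc] at this; simp at this
        · have hpre : p ++ [x] = (p ++ x :: t).take (p.length + 1) := by
            simp [List.take_append]
          have h2 : s.drop (s.length - 4)
              = ((p ++ x :: t).drop (p.length + 1 - 4)).take 4 := by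
            rw [hL, hs, hpre, List.drop_take]
            congr 1
            omega
          rw [h2] at hc
          exact h (p.length + 1 - 4) hc

theorem dropLast4_concat (u : List Int) :
    ((((u ++ [1, 2, 3, 1] : List Int).dropLast).dropLast).dropLast).dropLast = u := by
  have : (u ++ [1, 2, 3, 1] : List Int) = ((((u ++ [1]) ++ [2]) ++ [3]) ++ [1]) := by simp
  rw [this, List.dropLast_concat, List.dropLast_concat, List.dropLast_concat,
    List.dropLast_concat]

theorem take_no_window (l : List Int) (i : Nat) (hi : i ≤ l.length)
    (hmin : ∀ j, j < i → ((l.drop j).take 4) ≠ ([1, 2, 3, 1] : List Int)) :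
    ∀ j, (((l.take i).drop j).take 4) ≠ ([1, 2, 3, 1] : List Int) := by
  intro j hc
  have hlen : (((l.take i).drop j).take 4).length = 4 := by rw [hc]; rfl
  have hji : j + 4 ≤ i := by
    simp at hlen; omega
  rw [List.drop_take] at hc
  rw [List.take_take] at hc
  have : min 4 (i - j) = 4 := by omega
  rw [this] at hc
  exact hmin j (by omega) hc

theorem main_eq (n : Nat) : ∀ l : List Int, l.length ≤ n →
    (l.foldl stepA (0, ([] : List Int))).1 = loopB 0 l := by
  induction n with
  | zero =>
      intro l hl
      have : l = [] := by cases l <;> simp_all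
      subst this
      rw [loopB_none 0 [] rfl]
      simp
  | succ n ih =>
      intro l hl
      cases hf : findPat l with
      | none =>
          have hnr := fold_no_removal l [] 0 (by simpa using findPat_none_window l hf)
          simp only [List.nil_append] at hnr
          rw [loopB_none 0 l hf, hnr]
      | some i =>
          obtain ⟨hw, hmin⟩ := findPat_some_window l i hf
          have hlen := findPat_some_le l i hf
          -- split l = take (i+4) ++ drop (i+4) and take (i+4) = take i ++ pattern
          have hsplit : l = l.take (i + 4) ++ l.drop (i + 4) := by simp
          have htk : l.take (i + 4) = l.take i ++ ([1, 2, 3, 1] : List Int) := by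
            rw [List.take_add, hw]
          -- running A over take i from empty stack: no removal
          have hrun1 : (l.take i).foldl stepA ((0 : Int), ([] : List Int))
              = (0, l.take i) := by
            have := fold_no_removal (l.take i) [] 0
              (by simpa using take_no_window l i (by omega) hmin)
            simpa using this
          -- the stack after appending the first k pattern ingredients is take (i+k) l
          have hstepk : ∀ k, k < 4 →
              l.take i ++ ([1, 2, 3, 1] : List Int).take (k + 1)
                = l.take (i + (k + 1)) := by
            intro k hk
            have hmm : min (k + 1) 4 = k + 1 := by omega
            conv_rhs => rw [List.take_add]
            rw [← hw, List.take_take, hmm]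
          have A1 : l.take i ++ [(1 : Int)] = l.take (i + 1) := by
            simpa using hstepk 0 (by omega)
          have A2 : l.take (i + 1) ++ [(2 : Int)] = l.take (i + 2) := by
            rw [← hstepk 0 (by omega), ← hstepk 1 (by omega)]; simp
          have A3 : l.take (i + 2) ++ [(3 : Int)] = l.take (i + 3) := by
            rw [← hstepk 1 (by omega), ← hstepk 2 (by omega)]; simp
          have A4 : l.take (i + 3) ++ [(1 : Int)] = l.take (i + 4) := by
            rw [← hstepk 2 (by omega), ← hstepk 3 (by omega)]; simp
          -- the `stack[-4:]` test fails while the pattern is incomplete …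
          have hcond : ∀ m, i < m → m < i + 4 →
              ¬ ((l.take m).drop ((l.take m).length - 4) = ([1, 2, 3, 1] : List Int)) := by
            intro m him hm4 hc
            by_cases hsm : m < 4
            · have h4 : ((l.take m).drop ((l.take m).length - 4)).length < 4 := by
                simp; omega
              rw [hc] at h4; simp at h4
            · have hml : (l.take m).length = m := by simp; omega
              rw [hml, List.drop_take] at hc
              have hmm : m - (m - 4) = 4 := by omega
              rw [hmm] at hc
              exact hmin (m - 4) (by omega) hc
          -- … and succeeds on the fourth ingredient
          have c4 : (l.take (i + 4)).drop ((l.take (i + 4)).length - 4)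
              = ([1, 2, 3, 1] : List Int) := by
            have hml : (l.take (i + 4)).length = i + 4 := by simp; omega
            rw [hml, List.drop_take, show i + 4 - 4 = i from by omega,
              show i + 4 - i = 4 from by omega, hw]
          have s1 : stepA ((0 : Int), l.take i) 1 = (0, l.take (i + 1)) := by
            simp only [stepA]
            rw [A1, if_neg (hcond (i + 1) (by omega) (by omega))]
          have s2 : stepA ((0 : Int), l.take (i + 1)) 2 = (0, l.take (i + 2)) := by
            simp only [stepA]
            rw [A2, if_neg (hcond (i + 2) (by omega) (by omega))]
          have s3 : stepA ((0 : Int), l.take (i + 2)) 3 = (0, l.take (i + 3)) := by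
            simp only [stepA]
            rw [A3, if_neg (hcond (i + 3) (by omega) (by omega))]
          have s4 : stepA ((0 : Int), l.take (i + 3)) 1 = (1, l.take i) := by
            simp only [stepA]
            rw [A4, if_pos c4, htk, dropLast4_concat]
            norm_num
          have hrun2 : (([1, 2, 3, 1] : List Int)).foldl stepA ((0 : Int), l.take i)
              = (1, l.take i) := by
            simp only [List.foldl_cons, List.foldl_nil, s1, s2, s3, s4]
          -- assemble
          have hsp : (l.take i ++ l.drop (i + 4)).foldl stepA ((0 : Int), ([] : List Int))
              = (l.drop (i + 4)).foldl stepA ((0 : Int), l.take i) := by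
            rw [List.foldl_append, hrun1]
          have ihs := ih (l.take i ++ l.drop (i + 4)) (by simp; omega)
          rw [hsp] at ihs
          conv_lhs => rw [hsplit]
          rw [List.foldl_append, htk, List.foldl_append, hrun1, hrun2, foldA_shift]
          rw [loopB_some 0 l i hf, loopB_shift, ← ihs]
          simp

-- ===== VERDICT (by name: the statement is the Claim_ definition above) =====
theorem solution_spec : Claim_equal_solution := by
  intro l _
  unfold Spec_solution solution solution_alt
  exact main_eq l.length l le_rfl
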